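-- pv_equiv track=rewrite | github.com/rookieboba/pytest | src/warehouse_area.py | calculate_warehouse_area
-- ===== SOURCE A (Python) =====
-- def calculate_warehouse_area(pillars):
--     pillars.sort()
--
--     warehouse = [0] * 1001
--     for l, h in pillars:
--         warehouse[l] = h
--
--     max_h = max(warehouse)
--     max_idx = warehouse.index(max_h)
--
--     area = 0
--
--     # 왼쪽 → max_idx
--     left_max = 0
--     for i in range(0, max_idx + 1):
--         if warehouse[i] > left_max:
--             left_max = warehouse[i]
--         area += left_max
--
--     # 오른쪽 → max_idx
--     right_max = 0
--     for i in range(1000, max_idx, -1):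
--         if warehouse[i] > right_max:
--             right_max = warehouse[i]
--         area += right_max
--
--     return area
-- ===== SOURCE B (Python) =====
-- def calculate_warehouse_area(pillars):
--     pillars.sort()
--
--     warehouse = [0] * 1001
--     for l, h in pillars:
--         warehouse[l] = h
--
--     pre = []
--     cur = 0
--     for x in warehouse:
--         cur = max(cur, x)
--         pre.append(cur)
--
--     suf = []
--     cur = 0
--     for x in reversed(warehouse):
--         cur = max(cur, x)
--         suf.append(cur)
--     suf.reverse()
--
--     return sum(min(a, b) for a, b in zip(pre, suf))
-- ===== Notes on version B (the rewrite author's own statement) =====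
-- stated objective: alternative
-- what changed: Replaces A's max/index search plus separate left-to-max and right-to-max running-max loops with two independent clamped prefix-max and suffix-max scans summed pointwise via min, removing the max/index passes and the split at max_idx.
import Mathlib
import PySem

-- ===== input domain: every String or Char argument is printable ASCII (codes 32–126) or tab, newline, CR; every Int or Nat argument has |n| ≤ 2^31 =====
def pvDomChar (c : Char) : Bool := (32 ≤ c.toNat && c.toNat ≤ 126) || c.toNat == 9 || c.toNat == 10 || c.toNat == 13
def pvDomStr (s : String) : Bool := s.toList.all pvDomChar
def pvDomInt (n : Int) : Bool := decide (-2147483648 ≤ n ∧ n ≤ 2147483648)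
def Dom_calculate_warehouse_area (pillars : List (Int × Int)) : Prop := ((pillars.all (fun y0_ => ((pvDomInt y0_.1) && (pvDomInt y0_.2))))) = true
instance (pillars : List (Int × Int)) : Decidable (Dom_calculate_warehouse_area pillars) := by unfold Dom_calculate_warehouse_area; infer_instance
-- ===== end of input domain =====

-- B replaces A's max/index search and the two loops split at max_idx by independent clamped
-- prefix-max and suffix-max scans summed pointwise via min (objective: alternative decomposition).
-- Both A and B sort `pillars` in place; the equivalence proved here is about the return value
-- (the mutation is identical in A and B anyway).

-- ===== PORT A =====
def calculate_warehouse_area (pillars : List (Int × Int)) : Int :=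
  let ps := PySem.List.sorted2 pillars (fun p => p.1) (fun p => p.2)
  let warehouse := ps.foldl (fun w p => PySem.List.pySetD w p.1 p.2) (List.replicate 1001 (0:Int))
  -- warehouse is nonempty, so Python's max()/index() cannot raise; `.getD 0` is unreachable
  let max_h := (PySem.List.max? warehouse (fun x => x)).getD 0
  let max_idx : Int := (((PySem.List.index? warehouse max_h).getD 0 : Nat) : Int)
  let left := (PySem.List.pyRange 0 (max_idx + 1) 1).foldl
      (fun (st : Int × Int) i =>
        let lm := if PySem.List.pyGetD warehouse i 0 > st.1 then PySem.List.pyGetD warehouse i 0 else st.1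
        (lm, st.2 + lm)) (0, 0)
  let right := (PySem.List.pyRange 1000 max_idx (-1)).foldl
      (fun (st : Int × Int) i =>
        let rm := if PySem.List.pyGetD warehouse i 0 > st.1 then PySem.List.pyGetD warehouse i 0 else st.1
        (rm, st.2 + rm)) (0, left.2)
  right.2

-- ===== PORT B =====
def calculate_warehouse_area_alt (pillars : List (Int × Int)) : Int :=
  let ps := PySem.List.sorted2 pillars (fun p => p.1) (fun p => p.2)
  let warehouse := ps.foldl (fun w p => PySem.List.pySetD w p.1 p.2) (List.replicate 1001 (0:Int))
  let pre := (warehouse.foldl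
      (fun (st : Int × List Int) x => let cur := max st.1 x; (cur, st.2 ++ [cur]))
      ((0:Int), ([]:List Int))).2
  let suf := ((warehouse.reverse.foldl
      (fun (st : Int × List Int) x => let cur := max st.1 x; (cur, st.2 ++ [cur]))
      ((0:Int), ([]:List Int))).2).reverse
  (pre.zip suf).foldl (fun acc p => acc + min p.1 p.2) 0

-- ===== PRECONDITION & SPEC =====
-- Pre_ excludes exactly the inputs where Python raises IndexError: a pillar position outside
-- the index range of the 1001-slot list (both A and B raise there, in the same build loop).
def Pre_calculate_warehouse_area (pillars : List (Int × Int)) : Prop :=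
  ∀ p ∈ pillars, -1001 ≤ p.1 ∧ p.1 ≤ 1000
instance (pillars : List (Int × Int)) : Decidable (Pre_calculate_warehouse_area pillars) := by
  unfold Pre_calculate_warehouse_area; infer_instance
def pvWitness_calculate_warehouse_area : (List (Int × Int)) := [(0, 5), (2, 3), (5, 7)]
def Spec_calculate_warehouse_area (pillars : List (Int × Int)) (out : Int) : Prop := out = calculate_warehouse_area_alt pillars
instance (pillars : List (Int × Int)) (out : Int) : Decidable (Spec_calculate_warehouse_area pillars out) := by unfold Spec_calculate_warehouse_area; infer_instance

-- ===== CLAIM (what is proved, stated in full; the proofs are below) =====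
def Claim_equal_calculate_warehouse_area : Prop := ∀ (pillars : List (Int × Int)), Dom_calculate_warehouse_area pillars → Pre_calculate_warehouse_area pillars → Spec_calculate_warehouse_area pillars (calculate_warehouse_area pillars)

-- ===== LEMMAS AND PROOFS =====

-- the shared first two lines of both programs (sort + fill the 1001-slot list)
def pvBuild (pillars : List (Int × Int)) : List Int :=
  (PySem.List.sorted2 pillars (fun p => p.1) (fun p => p.2)).foldl
    (fun w p => PySem.List.pySetD w p.1 p.2) (List.replicate 1001 (0:Int))

-- what A computes after the build (same text as port A's tail)
def pvAfterA (w : List Int) : Int :=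
  let max_h := (PySem.List.max? w (fun x => x)).getD 0
  let max_idx : Int := (((PySem.List.index? w max_h).getD 0 : Nat) : Int)
  let left := (PySem.List.pyRange 0 (max_idx + 1) 1).foldl
      (fun (st : Int × Int) i =>
        let lm := if PySem.List.pyGetD w i 0 > st.1 then PySem.List.pyGetD w i 0 else st.1
        (lm, st.2 + lm)) (0, 0)
  let right := (PySem.List.pyRange 1000 max_idx (-1)).foldl
      (fun (st : Int × Int) i =>
        let rm := if PySem.List.pyGetD w i 0 > st.1 then PySem.List.pyGetD w i 0 else st.1
        (rm, st.2 + rm)) (0, left.2)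
  right.2

-- what B computes after the build (same text as port B's tail)
def pvAfterB (w : List Int) : Int :=
  let pre := (w.foldl
      (fun (st : Int × List Int) x => let cur := max st.1 x; (cur, st.2 ++ [cur]))
      ((0:Int), ([]:List Int))).2
  let suf := ((w.reverse.foldl
      (fun (st : Int × List Int) x => let cur := max st.1 x; (cur, st.2 ++ [cur]))
      ((0:Int), ([]:List Int))).2).reverse
  (pre.zip suf).foldl (fun acc p => acc + min p.1 p.2) 0

theorem portA_eq (pillars : List (Int × Int)) :
    calculate_warehouse_area pillars = pvAfterA (pvBuild pillars) := rfl

theorem portB_eq (pillars : List (Int × Int)) :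
    calculate_warehouse_area_alt pillars = pvAfterB (pvBuild pillars) := rfl

theorem pvBuild_length (pillars : List (Int × Int)) : (pvBuild pillars).length = 1001 := by
  unfold pvBuild
  generalize (PySem.List.sorted2 pillars (fun p => p.1) (fun p => p.2)) = l
  have h : ∀ (l : List (Int × Int)) (w : List Int),
      (l.foldl (fun w p => PySem.List.pySetD w p.1 p.2) w).length = w.length := by
    intro l
    induction l with
    | nil => intro w; rfl
    | cons p t ih => intro w; rw [List.foldl_cons, ih, PySem.List.length_pySetD]
  rw [h, List.length_replicate]

-- clamped prefix maximum max(0, w[0..i]) and suffix maximum max(0, w[i..])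
def pvP (w : List Int) (i : Nat) : Int := (w.take (i+1)).foldl max 0
def pvS (w : List Int) (i : Nat) : Int := (w.drop i).foldl max 0

-- the list of running maxima that B's append loop builds
def pvScan (c : Int) : List Int → List Int
  | [] => []
  | x :: xs => max c x :: pvScan (max c x) xs

theorem foldl_max_out (xs : List Int) : ∀ (c x : Int), xs.foldl max (max c x) = max (xs.foldl max c) x := by
  induction xs with
  | nil => intro c x; rfl
  | cons y t ih =>
    intro c x
    simp only [List.foldl_cons]
    rw [show max (max c x) y = max (max c y) x by
      rcases le_total c x with h | h <;> rcases le_total c y with h' | h' <;>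
        rcases le_total x y with h'' | h'' <;> simp [max_def] <;> omega]
    exact ih (max c y) x

theorem foldl_max_reverse (xs : List Int) : ∀ c : Int, xs.reverse.foldl max c = xs.foldl max c := by
  induction xs with
  | nil => intro c; rfl
  | cons x t ih =>
    intro c
    simp only [List.reverse_cons, List.foldl_append, List.foldl_cons, List.foldl_nil, ih]
    rw [← foldl_max_out]

theorem pvScan_spec (xs : List Int) : ∀ (c : Int) (acc : List Int),
    xs.foldl (fun (st : Int × List Int) x => let cur := max st.1 x; (cur, st.2 ++ [cur]))
      (c, acc) = (xs.foldl max c, acc ++ pvScan c xs) := by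
  induction xs with
  | nil => intro c acc; simp [pvScan]
  | cons x t ih => intro c acc; simp [pvScan, List.foldl_cons, ih]

theorem pvScan_length (xs : List Int) : ∀ c, (pvScan c xs).length = xs.length := by
  induction xs with
  | nil => intro c; rfl
  | cons x t ih => intro c; simp [pvScan, ih]

theorem pvScan_getElem (xs : List Int) : ∀ (c : Int) (i : Nat) (h : i < xs.length),
    (pvScan c xs)[i]'(by rw [pvScan_length]; exact h) = (xs.take (i+1)).foldl max c := by
  induction xs with
  | nil => intro c i h; simp at h
  | cons x t ih =>
    intro c i h
    cases i with
    | zero => simp [pvScan]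
    | succ j =>
      simp only [pvScan, List.getElem_cons_succ, List.take_succ_cons, List.foldl_cons]
      exact ih (max c x) j (by simpa using h)

theorem pvP_le_of_max {w : List Int} {m : Int} (hm : ∀ y ∈ w, y ≤ m) (i : Nat) :
    pvP w i ≤ max 0 m := by
  unfold pvP
  rcases PySem.List.foldl_max_mem (w.take (i+1)) 0 with h | h
  · rw [h]; exact le_max_left 0 m
  · exact le_trans (hm _ (List.mem_of_mem_take h)) (le_max_right 0 m)

theorem pvS_le_of_max {w : List Int} {m : Int} (hm : ∀ y ∈ w, y ≤ m) (i : Nat) :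
    pvS w i ≤ max 0 m := by
  unfold pvS
  rcases PySem.List.foldl_max_mem (w.drop i) 0 with h | h
  · rw [h]; exact le_max_left 0 m
  · exact le_trans (hm _ (List.mem_of_mem_drop h)) (le_max_right 0 m)

theorem max_le_pvP {w : List Int} {k : Nat} (hk : k < w.length) (i : Nat) (hki : k ≤ i) :
    max 0 (w[k]) ≤ pvP w i := by
  unfold pvP
  have hmem : w[k] ∈ w.take (i+1) := by
    have h1 : k < (w.take (i+1)).length := by simp [List.length_take]; omega
    refine List.mem_iff_getElem.mpr ⟨k, h1, ?_⟩
    exact List.getElem_take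
  rcases PySem.List.le_foldl_max (w.take (i+1)) 0 with ⟨h0, hall⟩
  exact max_le h0 (hall _ hmem)

theorem max_le_pvS {w : List Int} {k : Nat} (hk : k < w.length) (i : Nat) (hik : i ≤ k) :
    max 0 (w[k]) ≤ pvS w i := by
  unfold pvS
  have h1 : k - i < (w.drop i).length := by simp [List.length_drop]; omega
  have hmem : w[k] ∈ w.drop i := by
    refine List.mem_iff_getElem.mpr ⟨k - i, h1, ?_⟩
    rw [List.getElem_drop]
    have : i + (k - i) = k := by omega
    simp [this]
  rcases PySem.List.le_foldl_max (w.drop i) 0 with ⟨h0, hall⟩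
  exact max_le h0 (hall _ hmem)

-- B's value on the filled list: the pointwise min of clamped prefix and suffix maxima
theorem pvAfterB_char (w : List Int) (hw : w.length = 1001) :
    pvAfterB w = ∑ i ∈ Finset.range 1001, min (pvP w i) (pvS w i) := by
  simp only [pvAfterB, pvScan_spec, List.nil_append]
  have hzip : (pvScan 0 w).zip (pvScan 0 w.reverse).reverse
      = (List.range 1001).map (fun i => (pvP w i, pvS w i)) := by
    apply List.ext_getElem
    · simp [List.length_zip, pvScan_length, hw]
    · intro i h1 h2
      have hi : i < 1001 := by simpa [List.length_zip, pvScan_length, hw] using h1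
      have hpre : i < (pvScan 0 w).length := by rw [pvScan_length, hw]; exact hi
      have hsuf : i < (pvScan 0 w.reverse).reverse.length := by
        simp [pvScan_length, hw]; omega
      rw [List.getElem_zip]
      have e1 : (pvScan 0 w)[i]'hpre = pvP w i := pvScan_getElem w 0 i (by omega)
      have e2 : (pvScan 0 w.reverse).reverse[i]'hsuf = pvS w i := by
        rw [List.getElem_reverse]
        have hidx : (pvScan 0 w.reverse).length - 1 - i < w.reverse.length := by
          simp [pvScan_length, hw]; omega
        rw [pvScan_getElem w.reverse 0 _ hidx]
        rw [show (pvScan 0 w.reverse).length - 1 - i + 1 = 1001 - i from by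
          simp [pvScan_length, hw]; omega]
        rw [List.take_reverse, foldl_max_reverse]
        unfold pvS
        rw [show w.length - (1001 - i) = i from by omega]
      rw [e1, e2]
      simp
  rw [hzip, PySem.List.foldl_add]
  simp only [List.map_map, Function.comp_def, zero_add]
  rfl

-- one step of A's loop body is a running max
theorem step_max (a v : Int) : (if v > a then v else a) = max a v := by
  split_ifs with h <;> simp [max_def] <;> omega

-- A's left loop: processing indices 0..k-1 accumulates the clamped prefix maxima
theorem A_left (w : List Int) (hw : w.length = 1001) :
    ∀ k : Nat, k ≤ 1001 →
    (PySem.List.pyRange 0 (k : Int) 1).foldl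
      (fun (st : Int × Int) i =>
        let lm := if PySem.List.pyGetD w i 0 > st.1 then PySem.List.pyGetD w i 0 else st.1
        (lm, st.2 + lm)) (0, 0)
    = ((w.take k).foldl max 0, ∑ j ∈ Finset.range k, pvP w j) := by
  intro k
  induction k with
  | zero =>
    intro _
    rw [show ((0:Nat):Int) = 0 from rfl, PySem.List.pyRange_one_eq_nil (le_refl 0)]
    simp
  | succ n ih =>
    intro hn
    have hcast : ((n + 1 : Nat) : Int) = (n : Int) + 1 := by push_cast; ring
    rw [hcast, PySem.List.pyRange_one_succ_right (by positivity), List.foldl_append,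
      ih (by omega)]
    simp only [List.foldl_cons, List.foldl_nil]
    have hnlt : n < w.length := by omega
    have hget : PySem.List.pyGetD w (n : Int) 0 = w[n] := by
      rw [PySem.List.pyGetD_natCast, List.getD_eq_getElem w 0 hnlt]
    have htake : (w.take (n+1)).foldl max 0 = max ((w.take n).foldl max 0) w[n] := by
      have ht : w.take (n+1) = w.take n ++ [w[n]] := by
        rw [List.take_add_one, List.getElem?_eq_getElem hnlt]
        rfl
      rw [ht, List.foldl_append, List.foldl_cons, List.foldl_nil]
    have hP : pvP w n = max ((w.take n).foldl max 0) w[n] := by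
      unfold pvP; rw [htake]
    rw [hget, step_max, htake, Finset.sum_range_succ, hP]

-- A's right loop: processing indices a, a-1, .., a-d+1 accumulates the clamped suffix maxima
theorem A_right (w : List Int) (hw : w.length = 1001) :
    ∀ (d : Nat), ∀ (a : Nat) (A : Int), a ≤ 1000 → d ≤ a →
    (PySem.List.pyRange (a : Int) ((a - d : Nat) : Int) (-1)).foldl
      (fun (st : Int × Int) i =>
        let rm := if PySem.List.pyGetD w i 0 > st.1 then PySem.List.pyGetD w i 0 else st.1
        (rm, st.2 + rm)) ((w.drop (a+1)).foldl max 0, A)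
    = ((w.drop (a - d + 1)).foldl max 0, A + ∑ j ∈ Finset.range d, pvS w (a - j)) := by
  intro d
  induction d with
  | zero =>
    intro a A ha hd
    rw [show ((a - 0 : Nat) : Int) = (a : Int) from by norm_num,
      PySem.List.pyRange_neg_one_eq_nil (le_refl (a : Int))]
    simp
  | succ n ih =>
    intro a A ha hd
    have hlt : ((a - (n+1) : Nat) : Int) < (a : Int) := by
      have : a - (n+1) < a := by omega
      exact_mod_cast this
    rw [PySem.List.pyRange_neg_one_cons hlt]
    simp only [List.foldl_cons]
    have halt : a < w.length := by omega
    have hget : PySem.List.pyGetD w (a : Int) 0 = w[a] := by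
      rw [PySem.List.pyGetD_natCast, List.getD_eq_getElem w 0 halt]
    have hdrop : max ((w.drop (a+1)).foldl max 0) w[a] = (w.drop a).foldl max 0 := by
      rw [List.drop_eq_getElem_cons halt, List.foldl_cons, foldl_max_out]
    rw [hget, step_max, hdrop]
    have ha1 : ((a : Int) - 1) = ((a - 1 : Nat) : Int) := by
      have h1 : (1:Nat) ≤ a := by omega
      push_cast [h1]; ring
    have hsub : ((a - (n+1) : Nat) : Int) = (((a - 1) - n : Nat) : Int) := by
      congr 1; omega
    have hdra : w.drop a = w.drop ((a - 1) + 1) := by congr 1; omega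
    rw [ha1, hsub, hdra, ih (a - 1) (A + (w.drop ((a - 1) + 1)).foldl max 0) (by omega) (by omega)]
    have hidx2 : a - 1 - n + 1 = a - (n + 1) + 1 := by omega
    have hf0 : pvS w (a - 0) = (w.drop ((a - 1) + 1)).foldl max 0 := by
      unfold pvS
      rw [show a - 0 = (a - 1) + 1 from by omega]
    have hfj : ∀ j, pvS w (a - 1 - j) = pvS w (a - (j + 1)) := by
      intro j; congr 1; omega
    rw [hidx2, Finset.sum_range_succ']
    simp only [hfj, hf0]
    rw [Prod.mk.injEq]
    exact ⟨rfl, by ring⟩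

-- main: for any filled 1001-slot list, A's two-loop area equals B's min-of-prefix/suffix sum
theorem after_eq (w : List Int) (hw : w.length = 1001) : pvAfterA w = pvAfterB w := by
  unfold pvAfterA
  -- name the maximum and its first index
  have hne : w ≠ [] := by intro h; rw [h] at hw; simp at hw
  obtain ⟨w0, t, rfl⟩ := List.exists_cons_of_ne_nil hne
  set m := t.foldl max w0 with hm
  have hmax? : (PySem.List.max? (w0 :: t) (fun x => x)) = some m := PySem.List.max?_id_cons w0 t
  have hmmem : m ∈ w0 :: t := PySem.List.max?_mem hmax?
  have hmle : ∀ y ∈ w0 :: t, y ≤ m := PySem.List.max?_isMax hmax?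
  obtain ⟨k, hk⟩ : ∃ k, PySem.List.index? (w0 :: t) m = some k := by
    have := (PySem.List.index?_isSome_iff (w0 :: t) m).mpr hmmem
    exact Option.isSome_iff_exists.mp this
  obtain ⟨hklt, hwk, -⟩ := PySem.List.getElem_of_index?_eq_some hk
  simp only [hmax?, Option.getD_some, hk]
  set w := w0 :: t with hwdef
  have hk1000 : k ≤ 1000 := by omega
  -- left loop
  have hcast1 : ((k : Int) + 1) = ((k + 1 : Nat) : Int) := by push_cast; ring
  rw [hcast1, A_left w hw (k+1) (by omega)]
  -- right loop
  have hinit : ((0 : Int)) = (w.drop (1000+1)).foldl max 0 := by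
    rw [show w.drop (1000+1) = [] from List.drop_eq_nil_of_le (by omega)]; rfl
  have hright := A_right w hw (1000 - k) 1000 (∑ j ∈ Finset.range (k+1), pvP w j) (le_refl _) (by omega)
  rw [show ((1000 - (1000 - k) : Nat) : Int) = (k : Int) from congrArg Nat.cast (by omega)] at hright
  rw [show (1000 - (1000 - k)) + 1 = k + 1 from by omega] at hright
  rw [show (((1000 : Nat)) : Int) = (1000 : Int) from by norm_num] at hright
  rw [← hinit] at hright
  rw [hright]
  -- B side
  rw [pvAfterB_char w hw]
  -- pointwise comparison, split the sum at k
  have hple : ∀ i, i ≤ k → min (pvP w i) (pvS w i) = pvP w i := by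
    intro i hik
    apply min_eq_left
    calc pvP w i ≤ max 0 m := pvP_le_of_max hmle i
    _ = max 0 w[k] := by rw [hwk]
    _ ≤ pvS w i := max_le_pvS hklt i hik
  have hsle : ∀ i, k < i → min (pvP w i) (pvS w i) = pvS w i := by
    intro i hki
    apply min_eq_right
    calc pvS w i ≤ max 0 m := pvS_le_of_max hmle i
    _ = max 0 w[k] := by rw [hwk]
    _ ≤ pvP w i := max_le_pvP hklt i (by omega)
  have hsplit : ∑ i ∈ Finset.range 1001, min (pvP w i) (pvS w i)
      = ∑ j ∈ Finset.range (k+1), pvP w j + ∑ j ∈ Finset.range (1000 - k), pvS w (1000 - j) := by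
    rw [← Finset.sum_range_add_sum_Ico _ (by omega : k+1 ≤ 1001)]
    have h1 : ∑ i ∈ Finset.range (k+1), min (pvP w i) (pvS w i)
        = ∑ j ∈ Finset.range (k+1), pvP w j :=
      Finset.sum_congr rfl (fun i hi => hple i (by
        rw [Finset.mem_range] at hi; omega))
    have h2 : ∑ i ∈ Finset.Ico (k+1) 1001, min (pvP w i) (pvS w i)
        = ∑ j ∈ Finset.range (1000 - k), pvS w (1000 - j) := by
      rw [Finset.sum_congr rfl (fun i hi => hsle i (by
        rw [Finset.mem_Ico] at hi; omega))]
      symm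
      apply Finset.sum_nbij' (fun j => 1000 - j) (fun i => 1000 - i)
      · intro a ha; rw [Finset.mem_range] at ha; rw [Finset.mem_Ico]; omega
      · intro a ha; rw [Finset.mem_Ico] at ha; rw [Finset.mem_range]; omega
      · intro a ha; rw [Finset.mem_range] at ha; omega
      · intro a ha; rw [Finset.mem_Ico] at ha; omega
      · intro a ha; rfl
    rw [h1, h2]
  exact hsplit.symm

-- ===== VERDICT (by name: the statement is the Claim_ definition above) =====
theorem calculate_warehouse_area_spec : Claim_equal_calculate_warehouse_area := by
  intro pillars _hdom _hpre
  unfold Spec_calculate_warehouse_area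
  rw [portA_eq, portB_eq, after_eq (pvBuild pillars) (pvBuild_length pillars)]
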